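-- pv_equiv track=rewrite | github.com/PaulHax/align-system | align_system/language_model_lib/util.py | dialog_from_string
-- ===== SOURCE A (Python) =====
-- from typing import List, Dict, Union
--
-- def dialog_from_string(dialog_string: str) -> List[Dict[str, str]]:
--     """
--     Transforms the dialog in string format to a list of dictionary format.
--
--     :param dialog_string: Dialog in string format.
--     :return: Dialog in the list of dictionary format.
--     """
--     # Dictionary to map string markers to role names
--     dialog_markers = {
--         '=== system': 'system',
--         '=== user': 'user',
--         '=== assistant': 'assistant',
--     }
--     dialog = []
--     lines = dialog_string.split('\n')
--
--     current_role = ''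
--     current_content = ''
--     for line in lines:
--         if line.strip() in dialog_markers:  # If a line indicates a role change
--             if current_role and current_content:  # Save the previous role's dialog
--                 dialog.append({
--                     'role': current_role,
--                     'content': current_content.strip()
--                 })
--             current_role = dialog_markers[line.strip()]  # Set the new role
--             current_content = ''
--         else:  # Continue appending content if the role hasn't changed
--             current_content += f'{line}\n'
--     # Append the last piece of dialog
--     if current_role and current_content:
--         dialog.append({
--             'role': current_role,
--             'content': current_content.strip()
--         })
--     return dialog
-- ===== SOURCE B (Python) =====
-- def dialog_from_string(dialog_string):
--     """Recursive-descent reimplementation: find marker indices and slice out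
--     each role's block, instead of a single accumulator pass."""
--     dialog_markers = {
--         '=== system': 'system',
--         '=== user': 'user',
--         '=== assistant': 'assistant',
--     }
--
--     def parse(lines):
--         i = next((k for k, l in enumerate(lines) if l.strip() in dialog_markers), None)
--         if i is None:
--             return []
--         role = dialog_markers[lines[i].strip()]
--         j = next((k for k in range(i + 1, len(lines))
--                   if lines[k].strip() in dialog_markers), len(lines))
--         body = lines[i + 1:j]
--         rest = parse(lines[j:])
--         if body:
--             return [{'role': role, 'content': '\n'.join(body).strip()}] + rest
--         return rest
--
--     return parse(dialog_string.split('\n'))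
-- ===== Notes on version B (the rewrite author's own statement) =====
-- stated objective: alternative
-- what changed: A is a single pass that threads a growing content-string accumulator and role state through every line; B instead searches for marker-line indices and slices each role's block of lines out wholesale (index-search + slice loop, joining each block once), with no character-level accumulator.
import Mathlib
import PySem

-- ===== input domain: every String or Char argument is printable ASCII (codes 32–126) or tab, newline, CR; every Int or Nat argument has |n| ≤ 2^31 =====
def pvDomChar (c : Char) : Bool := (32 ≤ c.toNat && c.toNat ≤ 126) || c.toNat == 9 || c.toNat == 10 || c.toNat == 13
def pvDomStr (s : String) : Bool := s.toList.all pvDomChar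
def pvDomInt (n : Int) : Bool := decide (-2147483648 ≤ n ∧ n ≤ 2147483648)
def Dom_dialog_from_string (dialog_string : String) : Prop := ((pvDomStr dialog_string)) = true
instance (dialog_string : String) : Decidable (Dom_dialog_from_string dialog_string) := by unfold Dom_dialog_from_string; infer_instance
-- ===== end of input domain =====

-- B replaces A's line-by-line accumulator pass with a marker-index search + slicing loop; objective: alternative decomposition (no speed claim).

-- ===== PORT A =====
-- the dialog_markers dict literal of A (keys as List Char, values the role names)
def pvMarkersA : PySem.Dict (List Char) String :=
  PySem.Dict.mk [("=== system".toList, "system"), ("=== user".toList, "user"), ("=== assistant".toList, "assistant")]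

-- one iteration of A's for-loop over (dialog, current_role, current_content)
def pvStepA (st : List (List (String × String)) × String × List Char) (line : List Char) :
    List (List (String × String)) × String × List Char :=
  match pvMarkersA.get? (PySem.Chars.strip line) with
  | some r =>
      let d := if st.2.1 ≠ "" ∧ st.2.2 ≠ [] then
                 st.1 ++ [[("role", st.2.1), ("content", String.ofList (PySem.Chars.strip st.2.2))]]
               else st.1
      (d, r, ([] : List Char))
  | none => (st.1, st.2.1, st.2.2 ++ line ++ ['\n'])

def dialog_from_string (dialog_string : String) : List (List (String × String)) :=
  let lines := PySem.Chars.splitOn dialog_string.toList ['\n']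
  let st := lines.foldl pvStepA ([], "", ([] : List Char))
  if st.2.1 ≠ "" ∧ st.2.2 ≠ [] then
    st.1 ++ [[("role", st.2.1), ("content", String.ofList (PySem.Chars.strip st.2.2))]]
  else st.1

-- ===== PORT B =====
def pvMarkersB : PySem.Dict (List Char) String :=
  PySem.Dict.mk [("=== system".toList, "system"), ("=== user".toList, "user"), ("=== assistant".toList, "assistant")]

-- "l.strip() in dialog_markers"
def pvIsMark (l : List Char) : Bool := (pvMarkersB.get? (PySem.Chars.strip l)).isSome
-- "dialog_markers[l.strip()]"
def pvRoleOf (l : List Char) : String := (pvMarkersB.get? (PySem.Chars.strip l)).getD ""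

-- Source B's parse loop: find the first marker index, find the next marker index j
-- (the search over range(i+1, len) is done on the dropped tail, offset by i+1 — same indices),
-- slice the body out, loop on lines[j:]
def pvParseGo (rest : List (List Char)) (out : List (List (String × String))) :
    List (List (String × String)) :=
  match h : rest.findIdx? pvIsMark with
  | none => out
  | some i =>
      let role := pvRoleOf (rest.getD i [])
      let j := (((rest.drop (i + 1)).findIdx? pvIsMark).map (fun k => i + 1 + k)).getD rest.length
      let body := (rest.drop (i + 1)).take (j - (i + 1))
      pvParseGo (rest.drop j)
        (if body.isEmpty then out
         else out ++ [[("role", role), ("content", String.ofList (PySem.Chars.strip (PySem.Chars.join ['\n'] body)))]])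
termination_by rest.length
decreasing_by
  have hne : rest ≠ [] := by rintro rfl; simp at h
  have hlen : 1 ≤ rest.length := by cases rest <;> simp_all
  simp only [List.length_drop]
  cases o : (rest.drop (i + 1)).findIdx? pvIsMark <;> simp <;> omega

def dialog_from_string_alt (dialog_string : String) : List (List (String × String)) :=
  pvParseGo (PySem.Chars.splitOn dialog_string.toList ['\n']) []

-- ===== PRECONDITION & SPEC =====
def Spec_dialog_from_string (dialog_string : String) (out : List (List (String × String))) : Prop := out = dialog_from_string_alt dialog_string
instance (dialog_string : String) (out : List (List (String × String))) : Decidable (Spec_dialog_from_string dialog_string out) := by unfold Spec_dialog_from_string; infer_instance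

-- ===== CLAIM (what is proved, stated in full; the proofs are below) =====
def Claim_equal_dialog_from_string : Prop := ∀ (dialog_string : String), Dom_dialog_from_string dialog_string → Spec_dialog_from_string dialog_string (dialog_from_string dialog_string)

-- ===== LEMMAS AND PROOFS =====

-- proof-side abbreviations of A's pieces
def pvFinish (st : List (List (String × String)) × String × List Char) : List (List (String × String)) :=
  if st.2.1 ≠ "" ∧ st.2.2 ≠ [] then
    st.1 ++ [[("role", st.2.1), ("content", String.ofList (PySem.Chars.strip st.2.2))]]
  else st.1

def pvEntry (r : String) (c : List Char) : List (String × String) :=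
  [("role", r), ("content", String.ofList (PySem.Chars.strip c))]

def pvEmitC (r : String) (c : List Char) : List (List (String × String)) :=
  if c = [] then [] else [pvEntry r c]

def pvEmitJ (r : String) (body : List (List Char)) : List (List (String × String)) :=
  if body.isEmpty then []
  else [[("role", r), ("content", String.ofList (PySem.Chars.strip (PySem.Chars.join ['\n'] body)))]]

def pvBump (c : List Char) (ls : List (List Char)) : List Char :=
  ls.foldl (fun c l => c ++ l ++ ['\n']) c

def pvNotMark (l : List Char) : Bool := !pvIsMark l

theorem pvMarkers_eq : pvMarkersB = pvMarkersA := rfl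

-- every role stored in the marker dict is a nonempty string (so A's truthiness test passes)
theorem pvRole_ne (k : List Char) (r : String) (h : pvMarkersA.get? k = some r) : r ≠ "" := by
  simp only [PySem.Dict.get?, Option.map_eq_some_iff] at h
  obtain ⟨p, hp, rfl⟩ := h
  have hmem := List.mem_of_find?_eq_some hp
  simp only [pvMarkersA, List.mem_cons, List.not_mem_nil, or_false] at hmem
  rcases hmem with h | h | h <;> rw [h] <;> decide

theorem pvNotMark_iff (l : List Char) : pvNotMark l = true ↔ pvMarkersA.get? (PySem.Chars.strip l) = none := by
  simp [pvNotMark, pvIsMark, pvMarkers_eq, Option.isSome]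
  split <;> simp_all

theorem pvIsMark_iff (l : List Char) : pvIsMark l = true ↔ ∃ r, pvMarkersA.get? (PySem.Chars.strip l) = some r := by
  simp [pvIsMark, pvMarkers_eq, Option.isSome_iff_exists]

-- no marker found: the whole list is marker-free
theorem pvF0 {α : Type} (p : α → Bool) (ls : List α) (h : ls.findIdx? p = none) :
    ls.dropWhile (fun x => !p x) = [] ∧ ls.takeWhile (fun x => !p x) = ls := by
  rw [List.findIdx?_eq_none_iff] at h
  constructor
  · rw [List.dropWhile_eq_nil_iff]
    intro x hx
    simp [h x hx]
  · rw [List.takeWhile_eq_self_iff]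
    intro x hx; simp [h x hx]

-- the first found index splits the list as takeWhile/dropWhile of the negated predicate
theorem pvF1 {α : Type} (p : α → Bool) (ls : List α) (i : Nat) (h : ls.findIdx? p = some i) :
    ls.takeWhile (fun x => !p x) = ls.take i ∧ ls.dropWhile (fun x => !p x) = ls.drop i := by
  induction ls generalizing i with
  | nil => simp at h
  | cons a t ih =>
      rw [List.findIdx?_cons] at h
      by_cases hp : p a = true
      · simp [hp] at h
        subst h
        simp [hp]
      · simp [hp] at h
        obtain ⟨j, hj, rfl⟩ := h
        obtain ⟨h1, h2⟩ := ih j hj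
        simp only [List.takeWhile_cons, List.dropWhile_cons, hp, Bool.not_false, if_true]
        exact ⟨by simp [h1], by simp [h2]⟩

-- stripping is insensitive to one trailing newline (A accumulates line + '\n', B joins with '\n')
set_option maxRecDepth 4096 in
theorem pvStrip_nl (ys : List Char) : PySem.Chars.strip (ys ++ ['\n']) = PySem.Chars.strip ys := by
  simp only [PySem.Chars.strip, PySem.Chars.lstrip, PySem.Chars.rstrip]
  rw [List.dropWhile_append]
  by_cases he : (List.dropWhile PySem.Chars.isspace ys).isEmpty = true
  · have h0 : List.dropWhile PySem.Chars.isspace ys = [] := by simpa [List.isEmpty_iff] using he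
    rw [if_pos he, h0]
    decide
  · rw [if_neg he]
    rw [List.reverse_append]
    simp only [List.reverse_cons, List.reverse_nil, List.nil_append, List.singleton_append]
    rw [List.dropWhile_cons]
    simp [show PySem.Chars.isspace '\n' = true from by decide]

theorem pvBump_eq (c : List Char) (ls : List (List Char)) :
    pvBump c ls = c ++ ls.flatMap (fun l => l ++ ['\n']) := by
  induction ls generalizing c with
  | nil => simp [pvBump]
  | cons l t ih =>
      simp only [pvBump, List.foldl_cons] at *
      rw [ih]
      simp

theorem pvFlat_eq (body : List (List Char)) (h : body ≠ []) :
    body.flatMap (fun l => l ++ ['\n']) = List.intercalate ['\n'] body ++ ['\n'] := by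
  induction body with
  | nil => simp at h
  | cons l t ih =>
      cases t with
      | nil => simp [List.intercalate]
      | cons l2 t2 =>
          rw [List.flatMap_cons, ih (by simp)]
          simp [List.intercalate]

-- A's stripped accumulator equals B's joined-then-stripped block
theorem pvE (r : String) (body : List (List Char)) :
    pvEmitC r (pvBump [] body) = pvEmitJ r body := by
  rw [pvEmitC, pvEmitJ, pvBump_eq]
  by_cases h : body = []
  · simp [h]
  · have hf : body.flatMap (fun l => l ++ ['\n']) ≠ [] := by
      cases body with
      | nil => simp at h
      | cons a t => simp
    simp only [List.nil_append, if_neg hf, List.isEmpty_iff, h, pvEntry]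
    rw [pvFlat_eq body h, pvStrip_nl]
    simp [PySem.Chars.join]

theorem pvP1 (ls : List (List Char)) (acc : List (List (String × String)))
    (h : ls.findIdx? pvIsMark = none) : pvParseGo ls acc = acc := by
  conv_lhs => rw [pvParseGo]; rw [h]

theorem pvAccEmit (acc : List (List (String × String))) (r : String) (body : List (List Char)) :
    (if body.isEmpty then acc
     else acc ++ [[("role", r), ("content", String.ofList (PySem.Chars.strip (PySem.Chars.join ['\n'] body)))]])
      = acc ++ pvEmitJ r body := by
  rw [pvEmitJ]; split <;> simp

-- one unfolding of B's loop when a marker is found at index i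
theorem pvP2 (ls : List (List Char)) (acc : List (List (String × String))) (i : Nat)
    (h : ls.findIdx? pvIsMark = some i) :
    pvParseGo ls acc =
      pvParseGo ((ls.drop (i + 1)).dropWhile pvNotMark)
        (acc ++ pvEmitJ (pvRoleOf (ls.getD i [])) ((ls.drop (i + 1)).takeWhile pvNotMark)) := by
  conv_lhs => rw [pvParseGo]; rw [h]
  simp only []
  have hnm : pvNotMark = (fun x : List Char => !pvIsMark x) := rfl
  cases o : (ls.drop (i + 1)).findIdx? pvIsMark with
  | none =>
      obtain ⟨hd, ht⟩ := pvF0 pvIsMark (ls.drop (i + 1)) o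
      have hbody : (ls.drop (i + 1)).take (ls.length - (i + 1)) = ls.drop (i + 1) := by
        apply List.take_of_length_le; simp
      simp only [Option.map_none, Option.getD_none]
      rw [hbody, List.drop_length, pvAccEmit, hnm, hd, ht, pvP1 [] _ (by simp)]
  | some k =>
      obtain ⟨h1, h2⟩ := pvF1 pvIsMark (ls.drop (i + 1)) k o
      simp only [Option.map_some, Option.getD_some]
      have hj : i + 1 + k - (i + 1) = k := by omega
      have hdj : ls.drop (i + 1 + k) = (ls.drop (i + 1)).drop k := by
        rw [List.drop_drop]
      rw [hj, hdj, pvAccEmit, hnm, h1, h2]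

-- B's loop ignores any marker-free prefix
theorem pvP0 (ls : List (List Char)) (acc : List (List (String × String))) :
    pvParseGo ls acc = pvParseGo (ls.dropWhile pvNotMark) acc := by
  have hnm : pvNotMark = (fun x : List Char => !pvIsMark x) := rfl
  cases h : ls.findIdx? pvIsMark with
  | none =>
      obtain ⟨hd, _⟩ := pvF0 pvIsMark ls h
      rw [pvP1 ls acc h, hnm, hd, pvP1 [] acc (by simp)]
  | some i =>
      obtain ⟨hlt, hp, _⟩ := List.findIdx?_eq_some_iff_getElem.mp h
      obtain ⟨h1, h2⟩ := pvF1 pvIsMark ls i h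
      have hds : ls.drop i = ls[i] :: ls.drop (i + 1) := List.drop_eq_getElem_cons hlt
      have hfi : List.findIdx? pvIsMark (ls[i] :: ls.drop (i + 1)) = some 0 := by
        rw [List.findIdx?_cons]; simp [hp]
      have hgd : ls.getD i [] = ls[i] := List.getD_eq_getElem ls [] hlt
      rw [hnm, h2, hds, pvP2 (ls[i] :: ls.drop (i + 1)) acc 0 hfi, pvP2 ls acc i h]
      simp only [List.getD_cons_zero, List.drop_succ_cons, List.drop_zero, hgd]

-- the invariant of A's loop once a role is active
theorem pvL2 (lines : List (List Char)) (d : List (List (String × String))) (role : String)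
    (c : List Char) (hrole : role ≠ "") :
    pvFinish (List.foldl pvStepA (d, role, c) lines) =
      pvParseGo (lines.dropWhile pvNotMark)
        (d ++ pvEmitC role (pvBump c (lines.takeWhile pvNotMark))) := by
  induction lines generalizing d role c with
  | nil =>
      simp only [List.foldl_nil, List.dropWhile_nil, List.takeWhile_nil]
      rw [pvP1 [] _ (by simp), pvFinish, pvBump, List.foldl_nil, pvEmitC]
      by_cases hc : c = []
      · simp [hc, hrole]
      · simp [hc, hrole, pvEntry]
  | cons l rest ih =>
      cases hm : pvMarkersA.get? (PySem.Chars.strip l) with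
      | none =>
          have hnm : pvNotMark l = true := (pvNotMark_iff l).mpr hm
          rw [List.foldl_cons]
          have hstep : pvStepA (d, role, c) l = (d, role, c ++ l ++ ['\n']) := by
            simp [pvStepA, hm]
          rw [hstep, ih d role _ hrole]
          rw [List.dropWhile_cons_of_pos hnm, List.takeWhile_cons_of_pos hnm]
          rfl
      | some r =>
          have hmk : pvIsMark l = true := (pvIsMark_iff l).mpr ⟨r, hm⟩
          have hnm : pvNotMark l = false := by simp [pvNotMark, hmk]
          have hr : pvRoleOf l = r := by simp [pvRoleOf, pvMarkers_eq, hm]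
          have hrne : r ≠ "" := pvRole_ne _ r hm
          rw [List.foldl_cons]
          have hstep : pvStepA (d, role, c) l = (d ++ pvEmitC role c, r, ([] : List Char)) := by
            simp only [pvStepA, hm, pvEmitC, pvEntry]
            by_cases hc : c = []
            · simp [hc, hrole]
            · simp [hc, hrole]
          rw [hstep, ih _ r [] hrne]
          rw [List.dropWhile_cons_of_neg (by simp [hnm]), List.takeWhile_cons_of_neg (by simp [hnm])]
          rw [pvP2 (l :: rest) _ 0 (by rw [List.findIdx?_cons]; simp [hmk])]
          simp only [List.getD_cons_zero, List.drop_succ_cons, List.drop_zero]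
          rw [hr, ← pvE r _]
          simp [pvBump]

-- A's loop before the first marker: content is accumulated but never saved
theorem pvL0 (lines : List (List Char)) (d : List (List (String × String))) (c : List Char) :
    pvFinish (List.foldl pvStepA (d, "", c) lines) = pvParseGo (lines.dropWhile pvNotMark) d := by
  induction lines generalizing c with
  | nil =>
      simp only [List.foldl_nil, List.dropWhile_nil]
      rw [pvP1 [] _ (by simp), pvFinish]
      simp
  | cons l rest ih =>
      cases hm : pvMarkersA.get? (PySem.Chars.strip l) with
      | none =>
          have hnm : pvNotMark l = true := (pvNotMark_iff l).mpr hm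
          rw [List.foldl_cons]
          have hstep : pvStepA (d, "", c) l = (d, "", c ++ l ++ ['\n']) := by
            simp [pvStepA, hm]
          rw [hstep, ih _, List.dropWhile_cons_of_pos hnm]
      | some r =>
          have hmk : pvIsMark l = true := (pvIsMark_iff l).mpr ⟨r, hm⟩
          have hnm : pvNotMark l = false := by simp [pvNotMark, hmk]
          have hr : pvRoleOf l = r := by simp [pvRoleOf, pvMarkers_eq, hm]
          have hrne : r ≠ "" := pvRole_ne _ r hm
          rw [List.foldl_cons]
          have hstep : pvStepA (d, "", c) l = (d, r, ([] : List Char)) := by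
            simp [pvStepA, hm]
          rw [hstep, pvL2 rest d r [] hrne]
          rw [List.dropWhile_cons_of_neg (by simp [hnm])]
          rw [pvP2 (l :: rest) _ 0 (by rw [List.findIdx?_cons]; simp [hmk])]
          simp only [List.getD_cons_zero, List.drop_succ_cons, List.drop_zero]
          rw [hr, ← pvE r _]

-- ===== VERDICT (by name: the statement is the Claim_ definition above) =====
theorem dialog_from_string_spec : Claim_equal_dialog_from_string := by
  intro s _
  unfold Spec_dialog_from_string dialog_from_string_alt
  show pvFinish (List.foldl pvStepA ([], "", []) (PySem.Chars.splitOn s.toList ['\n'])) =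
    pvParseGo (PySem.Chars.splitOn s.toList ['\n']) []
  rw [pvL0, ← pvP0]
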